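-- pv_equiv track=rewrite | github.com/chiltom/code-platoon-assignments | ds-linear-vs-binary-search/searches.py | linear_search_last_occurrence
-- ===== SOURCE A (Python) =====
-- def linear_search_last_occurrence(lst, target) -> list:
--     steps = 0
--     last = -1
--     for index, num in enumerate(lst):
--         steps += 1
--         if num == target:
--             last = index
--
--     return [last, steps]
-- ===== SOURCE B (Python) =====
-- def linear_search_last_occurrence(lst, target) -> list:
--     last = -1
--     for i in range(len(lst) - 1, -1, -1):
--         if lst[i] == target:
--             last = i
--             break
--     return [last, len(lst)]
-- ===== Notes on version B (the rewrite author's own statement) =====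
-- stated objective: alternative
-- what changed: B scans from the end and stops at the first hit (the last occurrence), returning len(lst) as the step count directly, instead of A's forward full scan that overwrites the index and increments a counter.
import Mathlib
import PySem

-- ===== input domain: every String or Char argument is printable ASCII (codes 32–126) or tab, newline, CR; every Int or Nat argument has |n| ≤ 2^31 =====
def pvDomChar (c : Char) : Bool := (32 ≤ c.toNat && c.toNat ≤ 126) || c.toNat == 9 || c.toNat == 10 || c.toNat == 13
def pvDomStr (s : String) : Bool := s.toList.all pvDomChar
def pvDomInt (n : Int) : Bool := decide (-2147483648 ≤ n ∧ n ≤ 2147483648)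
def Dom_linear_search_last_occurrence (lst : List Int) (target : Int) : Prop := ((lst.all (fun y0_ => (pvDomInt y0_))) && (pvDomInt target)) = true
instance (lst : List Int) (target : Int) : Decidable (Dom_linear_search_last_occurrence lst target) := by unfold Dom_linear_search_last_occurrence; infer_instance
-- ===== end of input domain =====

-- ===== PORT A =====
-- A: forward scan with a step counter, overwriting `last` at each match.
def linear_search_last_occurrence (lst : List Int) (target : Int) : List Int :=
  let p := (PySem.List.enumerate lst).foldl
    (fun (p : Int × Int) (iv : Int × Int) => (p.1 + 1, if iv.2 = target then iv.1 else p.2))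
    (0, -1)
  [p.2, p.1]

-- ===== PORT B =====
-- B: scan from the end (`for i in range(len(lst)-1, -1, -1)`), break at the first hit;
-- steps is len(lst) directly.  Countdown recursion: argument k means next index k-1.
def lsFromEnd (lst : List Int) (target : Int) : Nat → Int
  | 0 => -1
  | k + 1 => if PySem.List.pyGet? lst (k : Int) = some target then (k : Int) else lsFromEnd lst target k

def linear_search_last_occurrence_alt (lst : List Int) (target : Int) : List Int :=
  [lsFromEnd lst target lst.length, (lst.length : Int)]

-- ===== PRECONDITION & SPEC =====
def Spec_linear_search_last_occurrence (lst : List Int) (target : Int) (out : List Int) : Prop := out = linear_search_last_occurrence_alt lst target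
instance (lst : List Int) (target : Int) (out : List Int) : Decidable (Spec_linear_search_last_occurrence lst target out) := by unfold Spec_linear_search_last_occurrence; infer_instance

-- ===== CLAIM (what is proved, stated in full; the proofs are below) =====
def Claim_equal_linear_search_last_occurrence : Prop := ∀ (lst : List Int) (target : Int), Dom_linear_search_last_occurrence lst target → Spec_linear_search_last_occurrence lst target (linear_search_last_occurrence lst target)

-- ===== LEMMAS AND PROOFS =====

lemma lsFromEnd_append (xs : List Int) (x target : Int) (k : Nat) (h : k ≤ xs.length) :
    lsFromEnd (xs ++ [x]) target k = lsFromEnd xs target k := by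
  induction k with
  | zero => rfl
  | succ k ih =>
    have hk : k < xs.length := h
    have hget : PySem.List.pyGet? (xs ++ [x]) (k : Int) = PySem.List.pyGet? xs (k : Int) := by
      simp [PySem.List.pyGet?_natCast, List.getElem?_append_left hk]
    simp only [lsFromEnd, hget, ih (Nat.le_of_lt hk)]

lemma foldA_eq (target : Int) (lst : List Int) :
    (PySem.List.enumerate lst).foldl
      (fun (p : Int × Int) (iv : Int × Int) => (p.1 + 1, if iv.2 = target then iv.1 else p.2))
      (0, -1)
    = ((lst.length : Int), lsFromEnd lst target lst.length) := by
  induction lst using List.reverseRecOn with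
  | nil => rfl
  | append_singleton xs x ih =>
    rw [PySem.List.enumerate_append, List.foldl_append, ih]
    simp [PySem.List.enumerate, lsFromEnd,
      lsFromEnd_append xs x target xs.length (le_refl _)]

-- ===== VERDICT (by name: the statement is the Claim_ definition above) =====
theorem linear_search_last_occurrence_spec : Claim_equal_linear_search_last_occurrence := by
  intro lst target _
  unfold Spec_linear_search_last_occurrence linear_search_last_occurrence linear_search_last_occurrence_alt
  rw [foldA_eq]
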